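-- pv_equiv track=rewrite | github.com/nulloneamyourfather-droid/RAG-Analysis-Malicious_Code | capability_chain.py | tokenize_name
-- ===== SOURCE A (Python) =====
-- from typing import Any, Dict, List, Set
--
-- def tokenize_name(name: str) -> List[str]:
--     out: List[str] = []
--     token = []
--     for ch in name.lower():
--         if ch.isalnum() or ch == "_":
--             token.append(ch)
--         else:
--             if token:
--                 out.append("".join(token))
--                 token = []
--     if token:
--         out.append("".join(token))
--     return [x for x in out if x not in {"sub", "j", "std"}]
-- ===== SOURCE B (Python) =====
-- from typing import Any, Dict, List, Set
--
-- def tokenize_name(name: str) -> List[str]: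
--     s = name.lower()
--     n = len(s)
--     res: List[str] = []
--     i = 0
--     while i < n:
--         if s[i].isalnum() or s[i] == "_":
--             j = i
--             while j < n and (s[j].isalnum() or s[j] == "_"):
--                 j += 1
--             tok = s[i:j]
--             if tok not in {"sub", "j", "std"}:
--                 res.append(tok)
--             i = j
--         else:
--             i += 1
--     return res
-- ===== Notes on version B (the rewrite author's own statement) =====
-- stated objective: alternative
-- what changed: Replaces the char-accumulator state machine plus a separate stopword-filter pass with a single span-scanning pass: at each word character it advances to the end of the run, slices the token out, and drops stopwords inline, so no character buffer and no second filtering pass are kept.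
import Mathlib
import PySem

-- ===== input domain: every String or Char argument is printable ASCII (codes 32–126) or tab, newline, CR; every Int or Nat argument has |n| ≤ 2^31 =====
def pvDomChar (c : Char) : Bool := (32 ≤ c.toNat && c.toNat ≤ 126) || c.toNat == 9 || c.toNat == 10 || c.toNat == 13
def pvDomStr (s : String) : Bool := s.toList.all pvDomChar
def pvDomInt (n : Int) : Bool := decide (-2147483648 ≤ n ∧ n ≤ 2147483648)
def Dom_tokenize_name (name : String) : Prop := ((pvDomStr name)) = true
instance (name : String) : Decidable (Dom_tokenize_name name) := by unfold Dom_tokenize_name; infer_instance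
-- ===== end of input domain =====

-- B replaces A's char-accumulator state machine + second stopword-filter pass by one
-- span-scanning pass that slices whole word runs and drops stopwords inline (objective: alternative).

-- shared small helpers: the word-character predicate and the stopword test
def pvWordChar (c : Char) : Bool := PySem.Chars.isalnum c || c == '_'
def pvStop (t : String) : Bool := t == "sub" || t == "j" || t == "std"

-- ===== PORT A =====
-- A's loop body: extend the pending token on a word char, otherwise flush it (if non-empty)
def pvStepA (st : List String × List Char) (ch : Char) : List String × List Char :=
  if pvWordChar ch then (st.1, st.2 ++ [ch])
  else if st.2.isEmpty then st else (st.1 ++ [String.ofList st.2], [])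

-- A's trailing `if token: out.append(...)`
def pvFinish (st : List String × List Char) : List String :=
  if st.2.isEmpty then st.1 else st.1 ++ [String.ofList st.2]

def tokenize_name (name : String) : List String :=
  (pvFinish ((PySem.Chars.lower name.toList).foldl pvStepA ([], []))).filter
    (fun x => !pvStop x)

-- ===== PORT B =====
-- Source B's while loops: skip a non-word char, or take the whole word run (the inner `while j` =
-- takeWhile, setting i = j = dropWhile), appending the sliced token unless it is a stopword
def pvAltGo (s : List Char) : List String :=
  match s with
  | [] => []
  | c :: rest =>
    if hw : pvWordChar c then
      let tok := String.ofList ((c :: rest).takeWhile pvWordChar)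
      let rest' := (c :: rest).dropWhile pvWordChar
      if pvStop tok then pvAltGo rest' else tok :: pvAltGo rest'
    else pvAltGo rest
termination_by s.length
decreasing_by
  · have h : (List.dropWhile pvWordChar (c :: rest)).length ≤ rest.length := by
      rw [List.dropWhile_cons_of_pos hw]; exact List.length_dropWhile_le _ _
    simpa using Nat.lt_succ_of_le h
  · have h : (List.dropWhile pvWordChar (c :: rest)).length ≤ rest.length := by
      rw [List.dropWhile_cons_of_pos hw]; exact List.length_dropWhile_le _ _
    simpa using Nat.lt_succ_of_le h
  · simp

def tokenize_name_alt (name : String) : List String :=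
  pvAltGo (PySem.Chars.lower name.toList)

-- ===== PRECONDITION & SPEC =====
def Spec_tokenize_name (name : String) (out : List String) : Prop := out = tokenize_name_alt name
instance (name : String) (out : List String) : Decidable (Spec_tokenize_name name out) := by unfold Spec_tokenize_name; infer_instance

-- ===== CLAIM (what is proved, stated in full; the proofs are below) =====
def Claim_equal_tokenize_name : Prop := ∀ (name : String), Dom_tokenize_name name → Spec_tokenize_name name (tokenize_name name)

-- ===== LEMMAS AND PROOFS =====

def pvFilt (l : List String) : List String := l.filter (fun x => !pvStop x)

-- B's result when a partial token `token` is already pending before scanning s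
def pvAltGoT (token : List Char) (s : List Char) : List String :=
  (if (token ++ s.takeWhile pvWordChar).isEmpty then []
   else if pvStop (String.ofList (token ++ s.takeWhile pvWordChar)) then []
   else [String.ofList (token ++ s.takeWhile pvWordChar)]) ++
  (match s.dropWhile pvWordChar with
   | [] => []
   | _ :: rest => pvAltGo rest)

lemma pvAltGo_eq_T : ∀ s : List Char, pvAltGo s = pvAltGoT [] s := by
  intro s
  induction s with
  | nil => simp [pvAltGo, pvAltGoT]
  | cons c rest ih =>
    by_cases hw : pvWordChar c = true
    · rw [pvAltGo]
      simp only [hw, dite_true, pvAltGoT, List.takeWhile_cons_of_pos hw,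
        List.dropWhile_cons_of_pos hw, List.nil_append, List.isEmpty_cons]
      have htail : pvAltGo (rest.dropWhile pvWordChar) =
          (match rest.dropWhile pvWordChar with
           | [] => []
           | _ :: r => pvAltGo r) := by
        cases hd : rest.dropWhile pvWordChar with
        | nil => simp [pvAltGo]
        | cons d r =>
          have hdw : pvWordChar d = false := by
            have := List.head_dropWhile_not pvWordChar (l := rest) (by simp [hd])
            simpa [hd] using this
          rw [pvAltGo]; simp [hdw]
      rw [htail]
      split <;> simp
    · have hw' : pvWordChar c = false := by simpa using hw
      rw [pvAltGo]
      simp [hw', ih, pvAltGoT, List.takeWhile_cons]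

lemma pvAltGoT_nonword_nil (c : Char) (s : List Char) (hw' : pvWordChar c = false) :
    pvAltGoT [] (c :: s) = pvAltGo s := by
  simp [pvAltGoT, List.takeWhile_cons, hw']

lemma pvMain : ∀ (s : List Char) (out : List String) (token : List Char),
    pvFilt (pvFinish (s.foldl pvStepA (out, token))) = pvFilt out ++ pvAltGoT token s := by
  intro s
  induction s with
  | nil =>
    intro out token
    cases token with
    | nil => simp [pvFinish, pvAltGoT, pvFilt]
    | cons c t =>
      simp only [List.foldl_nil, pvFinish, pvAltGoT, List.takeWhile_nil, List.append_nil,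
        List.dropWhile_nil, List.isEmpty_cons, pvFilt]
      by_cases hs : pvStop (String.ofList (c :: t)) = true <;> simp [hs]
  | cons c s ih =>
    intro out token
    by_cases hwp : pvWordChar c = true
    · have hstep : pvStepA (out, token) c = (out, token ++ [c]) := by simp [pvStepA, hwp]
      rw [List.foldl_cons, hstep, ih]
      congr 1
      simp [pvAltGoT, List.takeWhile_cons_of_pos hwp, List.dropWhile_cons_of_pos hwp]
    · have hw' : pvWordChar c = false := by simpa using hwp
      cases token with
      | nil =>
        have hstep : pvStepA (out, ([] : List Char)) c = (out, []) := by
          simp [pvStepA, hw']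
        rw [List.foldl_cons, hstep, ih]
        congr 1
        rw [pvAltGoT_nonword_nil c s hw', pvAltGo_eq_T s]
      | cons d t =>
        have hstep : pvStepA (out, d :: t) c = (out ++ [String.ofList (d :: t)], []) := by
          simp [pvStepA, hw']
        rw [List.foldl_cons, hstep, ih]
        simp only [pvFilt, List.filter_append, List.append_assoc]
        congr 1
        have hT : pvAltGoT (d :: t) (c :: s) =
            (if pvStop (String.ofList (d :: t)) = true then []
             else [String.ofList (d :: t)]) ++ pvAltGo s := by
          simp [pvAltGoT, hw']
        rw [hT, pvAltGo_eq_T s]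
        by_cases hs : pvStop (String.ofList (d :: t)) = true <;> simp [hs]

-- ===== VERDICT (by name: the statement is the Claim_ definition above) =====
theorem tokenize_name_spec : Claim_equal_tokenize_name := by
  intro name _
  show tokenize_name name = tokenize_name_alt name
  unfold tokenize_name tokenize_name_alt
  have := pvMain (PySem.Chars.lower name.toList) [] []
  simp only [pvFilt, pvAltGoT] at this ⊢
  rw [this, pvAltGo_eq_T, pvAltGoT]
  simp
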